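-- pv_equiv track=rewrite | github.com/BruE0/Numberphile | Amazing Graphs/remy.py | remy
-- ===== SOURCE A (Python) =====
-- from collections import defaultdict
--
-- def remy(size=10_000):
--     seq = [0]
--     index_that_used_n = defaultdict(list)
--     index_that_used_n.update({0: [1]})
--     attempt = 0
--     while len(seq) < size:
--         index = len(seq) + 1
--         if any(index & num for num in index_that_used_n[attempt]):
--             attempt += 1
--         else:
--             seq.append(attempt)
--             index_that_used_n[attempt].append(index)
--             attempt = 0
--     return seq
-- ===== SOURCE B (Python) =====
-- def _place(masks, index):
--     # first attempt whose OR-mask is bit-disjoint from index; OR index in (or append a new mask)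
--     for a, m in enumerate(masks):
--         if not (index & m):
--             masks[a] = m | index
--             return a
--     masks.append(index)
--     return len(masks) - 1
--
--
-- def remy(size=10_000):
--     seq = [0]
--     masks = [1]  # masks[a] = OR of the indices assigned to attempt a (index 1 used attempt 0)
--     for index in range(2, size + 1):
--         seq.append(_place(masks, index))
--     return seq
-- ===== Notes on version B (the rewrite author's own statement) =====
-- stated objective: faster
-- what changed: Replaces A's per-attempt lists of used indices (the any(...) generator rescans every index stored for the attempt) by a single OR-mask per attempt, so each attempt is tested with one bitwise AND; the while-loop with a resetting attempt counter becomes a for-loop over indices with a first-fit scan of the mask list.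
import Mathlib
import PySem

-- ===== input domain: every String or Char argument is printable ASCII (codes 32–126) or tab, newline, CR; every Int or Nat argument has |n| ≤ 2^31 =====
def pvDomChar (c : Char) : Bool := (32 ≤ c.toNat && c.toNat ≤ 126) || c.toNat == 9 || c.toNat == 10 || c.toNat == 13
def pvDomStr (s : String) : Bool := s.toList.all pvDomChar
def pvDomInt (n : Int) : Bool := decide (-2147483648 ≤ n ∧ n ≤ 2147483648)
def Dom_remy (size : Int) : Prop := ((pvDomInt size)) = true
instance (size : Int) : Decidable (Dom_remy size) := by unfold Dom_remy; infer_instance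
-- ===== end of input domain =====

-- B replaces A's per-attempt index LISTS (rescanned element by element for a bit overlap)
-- by one OR-mask per attempt, so the inner any(...) scan becomes a single AND; measured faster.

-- ===== PORT A =====
-- any(index & num for num in nums): truthy = a nonzero bitwise AND
def remyAny (index : Int) (nums : List Int) : Bool :=
  nums.any (fun num => PySem.Int.band index num != 0)

-- A's `attempt += 1` steps: attempt is 0 at each loop head that follows an append, so the
-- while body is this linear search followed by one append.  Fuel: the search stops no later
-- than the first attempt with an empty list, and at most seq.length attempts have a nonempty
-- list, so seq.length + 1 probes always suffice.
def remySearch (d : PySem.Dict Int (List Int)) (index : Int) (attempt : Int) : Nat → Int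
  | 0 => attempt
  | fuel + 1 =>
      if remyAny index (d.getD attempt []) then remySearch d index (attempt + 1) fuel
      else attempt

-- the while loop; each fuel step performs exactly one append, and `len(seq) < size` is
-- re-checked as in the source
def remyLoop (size : Int) (seq : List Int) (d : PySem.Dict Int (List Int)) : Nat → List Int
  | 0 => seq
  | fuel + 1 =>
      if (seq.length : Int) < size then
        let index : Int := (seq.length : Int) + 1
        let attempt := remySearch d index 0 (seq.length + 1)
        remyLoop size (seq ++ [attempt])
          (d.insert attempt (d.getD attempt [] ++ [index])) fuel
      else seq

def remy (size : Int) : List Int :=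
  remyLoop size [0] ((PySem.Dict.empty).insert 0 [1]) (size - 1).toNat

-- ===== PORT B =====
-- _place: scan the masks for the first attempt whose OR-mask is bit-disjoint from index,
-- OR index into it (mutation rendered as the returned list); append a fresh mask if none.
def remyPlace (index : Int) : List Int → Int × List Int
  | [] => (0, [index])
  | m :: rest =>
      if PySem.Int.band index m != 0 then
        let p := remyPlace index rest
        (p.1 + 1, m :: p.2)
      else (0, PySem.Int.bor m index :: rest)

def remy_alt (size : Int) : List Int :=
  ((PySem.List.pyRange 2 (size + 1) 1).foldl
    (fun st index =>
      let p := remyPlace index st.2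
      (st.1 ++ [p.1], p.2))
    (([0], [1]) : List Int × List Int)).1

-- ===== PRECONDITION & SPEC =====
def Spec_remy (size : Int) (out : List Int) : Prop := out = remy_alt size
instance (size : Int) (out : List Int) : Decidable (Spec_remy size out) := by unfold Spec_remy; infer_instance

-- ===== CLAIM (what is proved, stated in full; the proofs are below) =====
def Claim_equal_remy : Prop := ∀ (size : Int), Dom_remy size → Spec_remy size (remy size)

-- ===== LEMMAS AND PROOFS =====

-- x & (m | y) is nonzero iff one of x & m, x & y is (all operands nonnegative)
lemma band_bor_eq_zero_iff (x m y : Int) (hx : 0 ≤ x) (hm : 0 ≤ m) (hy : 0 ≤ y) :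
    PySem.Int.band x (PySem.Int.bor m y) = 0 ↔
      PySem.Int.band x m = 0 ∧ PySem.Int.band x y = 0 := by
  rw [PySem.Int.bor_of_nonneg hm hy,
      PySem.Int.band_of_nonneg hx (by positivity),
      PySem.Int.band_of_nonneg hx hm, PySem.Int.band_of_nonneg hx hy]
  have hd : x.toNat &&& (m.toNat ||| y.toNat) = (x.toNat &&& m.toNat) ||| (x.toNat &&& y.toNat) :=
    Nat.and_or_distrib_left x.toNat m.toNat y.toNat
  have h1 := Nat.left_le_or (n := x.toNat &&& m.toNat) (m := x.toNat &&& y.toNat)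
  have h2 := Nat.right_le_or (n := x.toNat &&& m.toNat) (m := x.toNat &&& y.toNat)
  constructor
  · intro h
    have h0 : x.toNat &&& (m.toNat ||| y.toNat) = 0 := by exact_mod_cast h
    rw [hd] at h0
    refine ⟨?_, ?_⟩
    · have : x.toNat &&& m.toNat = 0 := by omega
      exact_mod_cast this
    · have : x.toNat &&& y.toNat = 0 := by omega
      exact_mod_cast this
  · rintro ⟨ha, hb⟩
    have ha' : x.toNat &&& m.toNat = 0 := by exact_mod_cast ha
    have hb' : x.toNat &&& y.toNat = 0 := by exact_mod_cast hb
    have : x.toNat &&& (m.toNat ||| y.toNat) = 0 := by simp [hd, ha', hb']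
    exact_mod_cast this

lemma bor_nonneg (m y : Int) (hm : 0 ≤ m) (hy : 0 ≤ y) : 0 ≤ PySem.Int.bor m y := by
  rw [PySem.Int.bor_of_nonneg hm hy]; positivity

-- basic shape facts about remyPlace
lemma remyPlace_basic (index : Int) : ∀ ms : List Int,
    0 ≤ (remyPlace index ms).1 ∧ (remyPlace index ms).1 < ((remyPlace index ms).2.length : Int) ∧
    (ms.length ≤ (remyPlace index ms).2.length ∧ (remyPlace index ms).2.length ≤ ms.length + 1)
  | [] => by simp [remyPlace]
  | m :: rest => by
      have ih := remyPlace_basic index rest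
      obtain ⟨i1, i2, i3, i4⟩ := ih
      by_cases hcase : PySem.Int.band index m = 0
      · have hz : remyPlace index (m :: rest) = (0, PySem.Int.bor m index :: rest) := by
          simp [remyPlace, hcase]
        rw [hz]
        dsimp only
        simp only [List.length_cons]
        push_cast
        exact ⟨trivial, by omega, by omega, by omega⟩
      · have hz : remyPlace index (m :: rest) =
            ((remyPlace index rest).1 + 1, m :: (remyPlace index rest).2) := by
          simp [remyPlace, hcase]
        rw [hz]
        dsimp only
        simp only [List.length_cons]
        push_cast
        omega

-- pointwise effect of remyPlace on the masks
lemma remyPlace_getD (index : Int) : ∀ (ms : List Int) (k : Nat),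
    (remyPlace index ms).2.getD k 0 =
      if (k : Int) = (remyPlace index ms).1 then PySem.Int.bor (ms.getD k 0) index
      else ms.getD k 0
  | [], k => by
      rw [show remyPlace index ([] : List Int) = (0, [index]) from rfl]
      cases k with
      | zero => simp [List.getD, PySem.Int.bor_comm 0 index]
      | succ k =>
          rw [if_neg (by push_cast; omega)]
          simp [List.getD]
  | m :: rest, k => by
      have hb := (remyPlace_basic index rest).1
      by_cases hcase : PySem.Int.band index m = 0
      · have hz : remyPlace index (m :: rest) = (0, PySem.Int.bor m index :: rest) := by
          simp [remyPlace, hcase]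
        rw [hz]
        cases k with
        | zero => simp [List.getD]
        | succ k =>
            rw [if_neg (by push_cast; omega)]
            simp [List.getD]
      · have hz : remyPlace index (m :: rest) =
            ((remyPlace index rest).1 + 1, m :: (remyPlace index rest).2) := by
          simp [remyPlace, hcase]
        rw [hz]
        cases k with
        | zero =>
            rw [if_neg (by omega)]
            simp [List.getD]
        | succ k =>
            have ih := remyPlace_getD index rest k
            simp only [List.getD_cons_succ]
            rw [ih]
            by_cases hk : (k : Int) = (remyPlace index rest).1
            · rw [if_pos hk, if_pos (by push_cast; omega)]
            · rw [if_neg hk, if_neg (by push_cast; omega)]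

-- invariant tying A's dict of index lists to B's OR-masks
def RemyInv (d : PySem.Dict Int (List Int)) (masks : List Int) : Prop :=
  (∀ k : Nat, 0 ≤ masks.getD k 0) ∧
  (∀ x : Int, 0 ≤ x → ∀ k : Nat,
      remyAny x (d.getD (k : Int) []) = (PySem.Int.band x (masks.getD k 0) != 0)) ∧
  (∀ a : Int, (masks.length : Int) ≤ a → d.getD a [] = [])

-- A's linear search equals B's structural scan
lemma remySearch_eq (d : PySem.Dict Int (List Int)) (index : Int) :
    ∀ (ms : List Int) (a fuel : Nat), ms.length < fuel →
    (∀ k : Nat, remyAny index (d.getD ((a : Int) + k) []) =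
        (PySem.Int.band index (ms.getD k 0) != 0)) →
    remySearch d index (a : Int) fuel = (a : Int) + (remyPlace index ms).1
  | [], a, fuel, hf, H => by
      obtain ⟨f, rfl⟩ : ∃ f, fuel = f + 1 := ⟨fuel - 1, by omega⟩
      have h0 := H 0
      simp only [Nat.cast_zero, add_zero, List.getD] at h0
      simp [remySearch, h0, remyPlace]
  | m :: rest, a, fuel, hf, H => by
      obtain ⟨f, rfl⟩ : ∃ f, fuel = f + 1 := ⟨fuel - 1, by omega⟩
      have h0 := H 0
      simp only [Nat.cast_zero, add_zero, List.getD_cons_zero] at h0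
      by_cases hcase : PySem.Int.band index m = 0
      · have hfalse : remyAny index (d.getD (a : Int) []) = false := by
          rw [h0]; simp [hcase]
        have hplace : (remyPlace index (m :: rest)).1 = 0 := by
          simp [remyPlace, hcase]
        rw [hplace]
        simp [remySearch, hfalse]
      · have htrue : remyAny index (d.getD (a : Int) []) = true := by
          rw [h0]; simp [hcase]
        have ih := remySearch_eq d index rest (a + 1) f
          (by simpa using hf)
          (by
            intro k
            have hk := H (k + 1)
            have : ((a : Int)) + ((k + 1 : Nat) : Int) = (((a + 1 : Nat)) : Int) + k := by
              push_cast; ring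
            rw [this] at hk
            simpa using hk)
        have hplace : remyPlace index (m :: rest) =
            ((remyPlace index rest).1 + 1, m :: (remyPlace index rest).2) := by
          simp [remyPlace, hcase]
        rw [hplace]
        simp only [remySearch, htrue, if_pos]
        rw [show ((a : Int) + 1) = (((a + 1 : Nat)) : Int) by push_cast; ring, ih]
        push_cast; ring

-- the invariant survives one appended index
lemma remyInv_step (d : PySem.Dict Int (List Int)) (masks : List Int) (index : Int)
    (hidx : 0 ≤ index) (hInv : RemyInv d masks) :
    RemyInv (d.insert (remyPlace index masks).1
        (d.getD (remyPlace index masks).1 [] ++ [index]))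
      (remyPlace index masks).2 := by
  obtain ⟨hnn, hcorr, hemp⟩ := hInv
  obtain ⟨hb0, hb1, hb2, hb3⟩ := remyPlace_basic index masks
  refine ⟨?_, ?_, ?_⟩
  · intro k
    rw [remyPlace_getD]
    split_ifs with h
    · exact bor_nonneg _ _ (hnn k) hidx
    · exact hnn k
  · intro x hx k
    rw [PySem.Dict.getD_insert, remyPlace_getD]
    split_ifs with h
    · rw [← h]
      have key := band_bor_eq_zero_iff x (masks.getD k 0) index hx (hnn k) hidx
      rw [Bool.eq_iff_iff]
      simp only [remyAny, List.any_append, List.any_cons, List.any_nil, Bool.or_false,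
        Bool.or_eq_true, List.any_eq_true, bne_iff_ne, ne_eq]
      have hc := hcorr x hx k
      rw [Bool.eq_iff_iff] at hc
      simp only [remyAny, List.any_eq_true, bne_iff_ne, ne_eq] at hc
      constructor
      · rintro (hl | hr)
        · intro hz
          rw [key] at hz
          exact (hc.mp hl) hz.1
        · intro hz
          rw [key] at hz
          exact hr hz.2
      · intro hz
        by_cases hm : PySem.Int.band x (masks.getD k 0) = 0
        · by_cases hi : PySem.Int.band x index = 0
          · exact absurd (key.mpr ⟨hm, hi⟩) hz
          · exact Or.inr hi
        · exact Or.inl (hc.mpr hm)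
    · exact hcorr x hx k
  · intro a ha
    have hne : a ≠ (remyPlace index masks).1 := by
      intro h; rw [h] at ha; omega
    rw [PySem.Dict.getD_insert, if_neg hne]
    exact hemp a (by omega)

-- one B fold step, written exactly as in remy_alt
lemma remyLoop_eq (size : Int) : ∀ (n : Nat) (seq : List Int)
    (d : PySem.Dict Int (List Int)) (masks : List Int),
    (seq.length : Int) + n = size →
    masks.length ≤ seq.length →
    RemyInv d masks →
    remyLoop size seq d n =
      ((PySem.List.pyRange ((seq.length : Int) + 1) (size + 1) 1).foldl
        (fun st index =>
          let p := remyPlace index st.2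
          (st.1 ++ [p.1], p.2))
        ((seq, masks) : List Int × List Int)).1
  | 0, seq, d, masks, hsize, hlen, hInv => by
      rw [PySem.List.pyRange_one_eq_nil (by omega)]
      simp only [List.foldl_nil]
      simp [remyLoop]
  | n + 1, seq, d, masks, hsize, hlen, hInv => by
      have hcond : (seq.length : Int) < size := by omega
      have hidx : (0 : Int) ≤ (seq.length : Int) + 1 := by positivity
      have hsearch :
          remySearch d ((seq.length : Int) + 1) 0 (seq.length + 1) =
            (remyPlace ((seq.length : Int) + 1) masks).1 := by
        have H : ∀ k : Nat,
            remyAny ((seq.length : Int) + 1) (d.getD (((0 : Nat) : Int) + k) []) =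
              (PySem.Int.band ((seq.length : Int) + 1) (masks.getD k 0) != 0) := by
          intro k
          simpa using hInv.2.1 ((seq.length : Int) + 1) hidx k
        have := remySearch_eq d ((seq.length : Int) + 1) masks 0 (seq.length + 1)
          (by omega) H
        simpa using this
      obtain ⟨hb0, hb1, hb2, hb3⟩ := remyPlace_basic ((seq.length : Int) + 1) masks
      have ih := remyLoop_eq size n (seq ++ [(remyPlace ((seq.length : Int) + 1) masks).1])
        (d.insert (remyPlace ((seq.length : Int) + 1) masks).1
          (d.getD (remyPlace ((seq.length : Int) + 1) masks).1 [] ++ [(seq.length : Int) + 1]))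
        (remyPlace ((seq.length : Int) + 1) masks).2
        (by simp only [List.length_append, List.length_cons, List.length_nil]; push_cast; omega)
        (by simp only [List.length_append, List.length_cons, List.length_nil]; omega)
        (remyInv_step d masks ((seq.length : Int) + 1) hidx hInv)
      rw [PySem.List.pyRange_one_cons (by omega)]
      simp only [remyLoop, if_pos hcond, List.foldl_cons]
      rw [hsearch, ih]
      congr 2
      simp only [List.length_append, List.length_cons, List.length_nil]
      rfl

-- initial invariant: dict {0: [1]}, masks [1]
lemma remyInv_init : RemyInv ((PySem.Dict.empty).insert 0 [1]) [1] := by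
  refine ⟨?_, ?_, ?_⟩
  · intro k
    cases k <;> simp [List.getD]
  · intro x hx k
    rw [PySem.Dict.getD_insert]
    cases k with
    | zero => simp [remyAny, List.getD]
    | succ k =>
        rw [if_neg (by push_cast; omega)]
        simp [remyAny, PySem.Dict.getD_empty, List.getD]
  · intro a ha
    simp only [List.length_cons, List.length_nil] at ha
    rw [PySem.Dict.getD_insert, if_neg (by omega)]
    simp [PySem.Dict.getD_empty]

-- ===== VERDICT (by name: the statement is the Claim_ definition above) =====
theorem remy_spec : Claim_equal_remy := by
  intro size _
  unfold Spec_remy remy remy_alt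
  by_cases h : 1 ≤ size
  · have hn : ((([0] : List Int).length : Int)) + ((size - 1).toNat : Int) = size := by
      simp; omega
    have := remyLoop_eq size (size - 1).toNat [0] ((PySem.Dict.empty).insert 0 [1]) [1]
      hn (by simp) remyInv_init
    rw [this]
    norm_num
  · have h0 : (size - 1).toNat = 0 := by omega
    rw [h0, PySem.List.pyRange_one_eq_nil (by omega)]
    simp [remyLoop]
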